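-- pv_equiv track=rewrite | github.com/y24/TestStat-CLI | utils/DataAggregator.py | aggregate_daily_results
-- ===== SOURCE A (Python) =====
-- from collections import defaultdict
--
-- def aggregate_daily_results(data, results: list[str], completed_label:str, completed_results: list[str], executed_label:str, executed_results: list[str], plan_label:str, plan_data: list[str] = None):
--     """日付ごとのデータ集計"""
--     result_count = defaultdict(lambda: defaultdict(int))
--
--     def initialize_result_counts(results, date, result_count, completed_label, executed_label, plan_label):
--         for key in results:
--             result_count[date][key] = result_count[date].get(key, 0)
--         result_count[date][completed_label] = result_count[date].get(completed_label, 0)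
--         result_count[date][executed_label] = result_count[date].get(executed_label, 0)
--         result_count[date][plan_label] = result_count[date].get(plan_label, 0)
--         return result_count
--
--     for index, row in enumerate(data):
--         plan = plan_data[index] if plan_data and index < len(plan_data) else None
--         if plan and plan != [None] and len(plan) > 0:
--             plan_date = plan[0]
--             initialize_result_counts(results, plan_date, result_count, completed_label, executed_label, plan_label)
--             result_count[plan_date][plan_label] += 1
--
--         if len(row) >= 4:
--             result, name, date = row[0], row[1], row[2]
--         else:
--             result, name, date = row[0], row[1], row[2]
--
--         if not date: date = "no_date"
--         initialize_result_counts(results, date, result_count, completed_label, executed_label, plan_label)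
--
--         if result in results:
--             result_count[date][result] += 1
--         if result in completed_results:
--             result_count[date][completed_label] += 1
--         if result in executed_results:
--             result_count[date][executed_label] += 1
--
--     out_data = {}
--     no_date_data = {}
--     for date, counts in sorted(result_count.items()):
--         counts = {**counts}
--         if date == "no_date":
--             no_date_data = {"no_date": counts}
--         else:
--             out_data[date] = counts
--     return out_data, no_date_data
-- ===== SOURCE B (Python) =====
-- def aggregate_daily_results(data, results: list[str], completed_label: str, completed_results: list[str], executed_label: str, executed_results: list[str], plan_label: str, plan_data: list[str] = None):
--     """Index rows and plans by date in one pass, then tally each date against a fixed key template."""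
--     rows_by_date = {}
--     plan_counts = {}
--     date_order = []
--     for i, row in enumerate(data):
--         if plan_data and i < len(plan_data) and plan_data[i]:
--             pd = plan_data[i][0]
--             plan_counts[pd] = plan_counts.get(pd, 0) + 1
--             if pd not in date_order:
--                 date_order.append(pd)
--         d = row[2] or "no_date"
--         rows_by_date.setdefault(d, []).append(row[0])
--         if d not in date_order:
--             date_order.append(d)
--
--     template = list(dict.fromkeys(list(results) + [completed_label, executed_label, plan_label]))
--
--     out_data = {}
--     no_date_data = {}
--     for d in sorted(date_order):
--         counts = {k: 0 for k in template}
--         counts[plan_label] = counts.get(plan_label, 0) + plan_counts.get(d, 0)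
--         for r in rows_by_date.get(d, []):
--             if r in results:
--                 counts[r] += 1
--             if r in completed_results:
--                 counts[completed_label] += 1
--             if r in executed_results:
--                 counts[executed_label] += 1
--         if d == "no_date":
--             no_date_data = {"no_date": counts}
--         else:
--             out_data[d] = counts
--     return out_data, no_date_data
-- ===== Notes on version B (the rewrite author's own statement) =====
-- stated objective: faster
-- what changed: B builds per-date indexes (row-result lists, plan tallies, ordered date list) in one pass and then tallies each sorted date once against a deduplicated key template, instead of A's re-running the full template initialization through nested defaultdicts for every row and every plan entry; Pre_ only excludes rows shorter than 3 fields, on which A raises IndexError.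
import Mathlib
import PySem

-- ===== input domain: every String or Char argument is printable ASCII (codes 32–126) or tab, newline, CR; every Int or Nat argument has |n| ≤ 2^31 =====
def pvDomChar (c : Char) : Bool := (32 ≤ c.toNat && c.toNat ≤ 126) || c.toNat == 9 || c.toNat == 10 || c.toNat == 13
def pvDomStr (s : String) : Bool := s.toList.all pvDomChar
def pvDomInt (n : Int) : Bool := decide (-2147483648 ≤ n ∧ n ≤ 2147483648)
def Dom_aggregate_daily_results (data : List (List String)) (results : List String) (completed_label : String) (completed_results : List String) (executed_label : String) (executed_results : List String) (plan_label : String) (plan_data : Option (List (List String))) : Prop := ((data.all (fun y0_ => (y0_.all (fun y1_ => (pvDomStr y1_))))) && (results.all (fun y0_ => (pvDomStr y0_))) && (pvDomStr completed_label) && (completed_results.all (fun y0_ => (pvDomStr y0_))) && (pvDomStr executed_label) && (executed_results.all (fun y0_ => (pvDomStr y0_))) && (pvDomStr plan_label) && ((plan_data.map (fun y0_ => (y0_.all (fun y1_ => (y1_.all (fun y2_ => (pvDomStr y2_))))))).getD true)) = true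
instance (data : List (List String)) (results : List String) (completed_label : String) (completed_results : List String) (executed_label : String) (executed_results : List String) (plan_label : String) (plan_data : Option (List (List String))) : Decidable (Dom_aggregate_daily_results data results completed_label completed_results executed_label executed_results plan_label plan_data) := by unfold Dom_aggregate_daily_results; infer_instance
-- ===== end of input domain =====

-- B re-groups the data into per-date indexes in one pass and then tallies each sorted date once
-- against a fixed key template, instead of A's per-row re-initialization of all keys through nested
-- defaultdicts; measured constant-factor faster in a timing run.

-- ===== PORT A =====

-- initialize_result_counts: result_count[date][key] = result_count[date].get(key, 0) for each key,
-- then the three labels (defaultdict: a missing date materialises as an empty inner dict)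
def pvAInit (results : List String) (date : String)
    (rc : PySem.Dict String (PySem.Dict String Int))
    (completed_label executed_label plan_label : String) :
    PySem.Dict String (PySem.Dict String Int) :=
  let rc := results.foldl (fun rc key =>
    let inner := rc.getD date PySem.Dict.empty
    rc.insert date (inner.insert key (inner.getD key 0))) rc
  let rc :=
    let inner := rc.getD date PySem.Dict.empty
    rc.insert date (inner.insert completed_label (inner.getD completed_label 0))
  let rc :=
    let inner := rc.getD date PySem.Dict.empty
    rc.insert date (inner.insert executed_label (inner.getD executed_label 0))
  let inner := rc.getD date PySem.Dict.empty
  rc.insert date (inner.insert plan_label (inner.getD plan_label 0))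

-- result_count[date][key] += 1  (defaultdict semantics: missing levels default to {} / 0)
def pvAInc (rc : PySem.Dict String (PySem.Dict String Int)) (date key : String) :
    PySem.Dict String (PySem.Dict String Int) :=
  let inner := rc.getD date PySem.Dict.empty
  rc.insert date (inner.insert key (inner.getD key 0 + 1))

-- the body of A's `for index, row in enumerate(data)` loop
def pvAStep (results : List String) (completed_label : String) (completed_results : List String)
    (executed_label : String) (executed_results : List String) (plan_label : String)
    (plan_data : Option (List (List String)))
    (rc : PySem.Dict String (PySem.Dict String Int)) (ir : Int × List String) :
    PySem.Dict String (PySem.Dict String Int) :=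
  let i := ir.1
  let row := ir.2
  -- plan = plan_data[index] if plan_data and index < len(plan_data) else None
  let plan : Option (List String) :=
    match plan_data with
    | some pdl => if pdl ≠ [] ∧ i < (pdl.length : Int) then some (PySem.List.pyGetD pdl i []) else none
    | none => none
  -- if plan and plan != [None] and len(plan) > 0:  (a list of str never equals [None], and list
  -- truthiness already is len > 0, so the test is exactly: plan is a non-empty list)
  let rc :=
    match plan with
    | some pl =>
        if pl ≠ [] then
          let plan_date := PySem.List.pyGetD pl 0 ""
          let rc := pvAInit results plan_date rc completed_label executed_label plan_label
          pvAInc rc plan_date plan_label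
        else rc
    | none => rc
  -- result, name, date = row[0], row[1], row[2]  (both branches of A are identical; Pre_ guarantees
  -- len(row) ≥ 3, on which getD-indexing agrees with Python; row[1] is bound but unused)
  let result := PySem.List.pyGetD row 0 ""
  let date := PySem.List.pyGetD row 2 ""
  let date := if date = "" then "no_date" else date
  let rc := pvAInit results date rc completed_label executed_label plan_label
  let rc := if results.contains result then pvAInc rc date result else rc
  let rc := if completed_results.contains result then pvAInc rc date completed_label else rc
  let rc := if executed_results.contains result then pvAInc rc date executed_label else rc
  rc

def aggregate_daily_results (data : List (List String)) (results : List String) (completed_label : String) (completed_results : List String) (executed_label : String) (executed_results : List String) (plan_label : String) (plan_data : Option (List (List String))) : (List (String × List (String × Int))) × (List (String × List (String × Int))) :=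
  let result_count := (PySem.List.enumerate data).foldl
    (pvAStep results completed_label completed_results executed_label executed_results plan_label plan_data)
    PySem.Dict.empty
  -- sorted(result_count.items()): dict keys are distinct, so Python's tuple sort orders by the date; exact
  let items := PySem.List.sorted result_count.items (fun kv => kv.1) false
  let fin := items.foldl
    (fun (acc : PySem.Dict String (PySem.Dict String Int) × PySem.Dict String (PySem.Dict String Int)) kv =>
      if kv.1 = "no_date" then (acc.1, PySem.Dict.empty.insert "no_date" kv.2)
      else (acc.1.insert kv.1 kv.2, acc.2))
    (PySem.Dict.empty, PySem.Dict.empty)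
  (fin.1.items.map (fun q => (q.1, q.2.items)), fin.2.items.map (fun q => (q.1, q.2.items)))

-- ===== PORT B =====

-- the body of B's indexing loop: state = (rows_by_date, plan_counts, date_order)
def pvBStep (plan_data : Option (List (List String)))
    (st : PySem.Dict String (List String) × PySem.Dict String Int × List String)
    (ir : Int × List String) :
    PySem.Dict String (List String) × PySem.Dict String Int × List String :=
  let i := ir.1
  let row := ir.2
  let st :=
    match plan_data with
    | some pdl =>
        if pdl ≠ [] ∧ i < (pdl.length : Int) ∧ PySem.List.pyGetD pdl i [] ≠ [] then
          let pd := PySem.List.pyGetD (PySem.List.pyGetD pdl i []) 0 ""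
          (st.1, st.2.1.insert pd (st.2.1.getD pd 0 + 1),
           if st.2.2.contains pd then st.2.2 else st.2.2 ++ [pd])
        else st
    | none => st
  let d := if PySem.List.pyGetD row 2 "" = "" then "no_date" else PySem.List.pyGetD row 2 ""
  (st.1.modify d [] (fun l => l ++ [PySem.List.pyGetD row 0 ""]),
   st.2.1,
   if st.2.2.contains d then st.2.2 else st.2.2 ++ [d])

-- the three membership-guarded increments of B's tally loop
def pvRowOp (results : List String) (completed_label : String) (completed_results : List String)
    (executed_label : String) (executed_results : List String)
    (cd : PySem.Dict String Int) (r : String) : PySem.Dict String Int :=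
  let cd := if results.contains r then cd.insert r (cd.getD r 0 + 1) else cd
  let cd := if completed_results.contains r then cd.insert completed_label (cd.getD completed_label 0 + 1) else cd
  if executed_results.contains r then cd.insert executed_label (cd.getD executed_label 0 + 1) else cd

-- one date's counts: zeroed template, plus the plan tally, plus this date's row results
def pvBTally (results : List String) (completed_label : String) (completed_results : List String)
    (executed_label : String) (executed_results : List String) (plan_label : String)
    (template : List String) (plan_counts : PySem.Dict String Int)
    (rows_by_date : PySem.Dict String (List String)) (d : String) : PySem.Dict String Int :=
  let counts := template.foldl (fun cd k => cd.insert k (0 : Int)) PySem.Dict.empty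
  let counts := counts.insert plan_label (counts.getD plan_label 0 + plan_counts.getD d 0)
  (rows_by_date.getD d []).foldl (pvRowOp results completed_label completed_results executed_label executed_results) counts

def aggregate_daily_results_alt (data : List (List String)) (results : List String) (completed_label : String) (completed_results : List String) (executed_label : String) (executed_results : List String) (plan_label : String) (plan_data : Option (List (List String))) : (List (String × List (String × Int))) × (List (String × List (String × Int))) :=
  let st := (PySem.List.enumerate data).foldl (pvBStep plan_data)
    (PySem.Dict.empty, PySem.Dict.empty, [])
  let rows_by_date := st.1
  let plan_counts := st.2.1
  let date_order := st.2.2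
  -- template = list(dict.fromkeys(list(results) + [completed_label, executed_label, plan_label]))
  let template := PySem.List.dedup (results ++ [completed_label, executed_label, plan_label])
  let fin := (PySem.List.sorted date_order (fun x => x) false).foldl
    (fun (acc : PySem.Dict String (PySem.Dict String Int) × PySem.Dict String (PySem.Dict String Int)) d =>
      let counts := pvBTally results completed_label completed_results executed_label executed_results plan_label template plan_counts rows_by_date d
      if d = "no_date" then (acc.1, PySem.Dict.empty.insert "no_date" counts)
      else (acc.1.insert d counts, acc.2))
    (PySem.Dict.empty, PySem.Dict.empty)
  (fin.1.items.map (fun q => (q.1, q.2.items)), fin.2.items.map (fun q => (q.1, q.2.items)))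

-- ===== PRECONDITION & SPEC =====

-- A evaluates row[0], row[1], row[2] on every row and raises IndexError on rows shorter than 3
-- fields; exactly those inputs are excluded (B raises there too).
def Pre_aggregate_daily_results (data : List (List String)) (results : List String) (completed_label : String) (completed_results : List String) (executed_label : String) (executed_results : List String) (plan_label : String) (plan_data : Option (List (List String))) : Prop :=
  ∀ row ∈ data, 3 ≤ row.length
instance (data : List (List String)) (results : List String) (completed_label : String) (completed_results : List String) (executed_label : String) (executed_results : List String) (plan_label : String) (plan_data : Option (List (List String))) : Decidable (Pre_aggregate_daily_results data results completed_label completed_results executed_label executed_results plan_label plan_data) := by unfold Pre_aggregate_daily_results; infer_instance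

def pvWitness_aggregate_daily_results : List (List String) × List String × String × List String × String × List String × String × Option (List (List String)) :=
  ([["pass", "t1", "2024-01-02"], ["fail", "t2", ""]], ["pass", "fail"], "completed", ["pass", "fail"], "executed", ["pass"], "plan", some [["2024-01-01"]])

def Spec_aggregate_daily_results (data : List (List String)) (results : List String) (completed_label : String) (completed_results : List String) (executed_label : String) (executed_results : List String) (plan_label : String) (plan_data : Option (List (List String))) (out : (List (String × List (String × Int))) × (List (String × List (String × Int)))) : Prop := out = aggregate_daily_results_alt data results completed_label completed_results executed_label executed_results plan_label plan_data
instance (data : List (List String)) (results : List String) (completed_label : String) (completed_results : List String) (executed_label : String) (executed_results : List String) (plan_label : String) (plan_data : Option (List (List String))) (out : (List (String × List (String × Int))) × (List (String × List (String × Int)))) : Decidable (Spec_aggregate_daily_results data results completed_label completed_results executed_label executed_results plan_label plan_data out) := by unfold Spec_aggregate_daily_results; infer_instance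

-- ===== CLAIM (what is proved, stated in full; the proofs are below) =====
def Claim_equal_aggregate_daily_results : Prop := ∀ (data : List (List String)) (results : List String) (completed_label : String) (completed_results : List String) (executed_label : String) (executed_results : List String) (plan_label : String) (plan_data : Option (List (List String))), Dom_aggregate_daily_results data results completed_label completed_results executed_label executed_results plan_label plan_data → Pre_aggregate_daily_results data results completed_label completed_results executed_label executed_results plan_label plan_data → Spec_aggregate_daily_results data results completed_label completed_results executed_label executed_results plan_label plan_data (aggregate_daily_results data results completed_label completed_results executed_label executed_results plan_label plan_data)

-- ===== LEMMAS AND PROOFS =====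

-- ---------- semantic model ----------

-- the plan date registered at index i, if any
def pvPlanAt (plan_data : Option (List (List String))) (i : Int) : Option String :=
  match plan_data with
  | some pdl =>
      if pdl ≠ [] ∧ i < (pdl.length : Int) ∧ PySem.List.pyGetD pdl i [] ≠ [] then
        some (PySem.List.pyGetD (PySem.List.pyGetD pdl i []) 0 "")
      else none
  | none => none

-- the normalized date of a row
def pvNorm (row : List String) : String :=
  if PySem.List.pyGetD row 2 "" = "" then "no_date" else PySem.List.pyGetD row 2 ""

-- all dates touched while processing l, in touch order (with multiplicity)
def pvDates (plan_data : Option (List (List String))) (l : List (Int × List String)) : List String :=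
  l.flatMap (fun ir => (pvPlanAt plan_data ir.1).toList ++ [pvNorm ir.2])

def pvPlanCnt (plan_data : Option (List (List String))) (l : List (Int × List String)) (d : String) : Int :=
  (l.countP (fun ir => pvPlanAt plan_data ir.1 == some d) : Int)

def pvRows (l : List (Int × List String)) (d : String) : List String :=
  (l.filter (fun ir => pvNorm ir.2 == d)).map (fun ir => PySem.List.pyGetD ir.2 0 "")

def pvContrib (results : List String) (completed_label : String) (completed_results : List String)
    (executed_label : String) (executed_results : List String) (r k : String) : Int :=
  (if k = r ∧ results.contains r then 1 else 0)
  + (if k = completed_label ∧ completed_results.contains r then 1 else 0)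
  + (if k = executed_label ∧ executed_results.contains r then 1 else 0)

def pvStepVal (results : List String) (completed_label : String) (completed_results : List String)
    (executed_label : String) (executed_results : List String) (plan_label : String)
    (plan_data : Option (List (List String))) (ir : Int × List String) (d k : String) : Int :=
  (if pvPlanAt plan_data ir.1 = some d ∧ k = plan_label then 1 else 0)
  + (if pvNorm ir.2 = d then pvContrib results completed_label completed_results executed_label executed_results (PySem.List.pyGetD ir.2 0 "") k else 0)

def pvVal (results : List String) (completed_label : String) (completed_results : List String)
    (executed_label : String) (executed_results : List String) (plan_label : String)
    (plan_data : Option (List (List String))) (l : List (Int × List String)) (d k : String) : Int :=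
  (l.map (fun ir => pvStepVal results completed_label completed_results executed_label executed_results plan_label plan_data ir d k)).sum

def pvTpl (results : List String) (completed_label executed_label plan_label : String) : List String :=
  PySem.Set.ofList (results ++ [completed_label, executed_label, plan_label])

def pvMk {ν : Type} (ks : List String) (f : String → ν) : PySem.Dict String ν :=
  PySem.Dict.mk (ks.map (fun k => (k, f k)))

def pvInnerInit (results : List String) (completed_label executed_label plan_label : String)
    (inner : PySem.Dict String Int) : PySem.Dict String Int :=
  (results ++ [completed_label, executed_label, plan_label]).foldl
    (fun inn k => inn.insert k (inn.getD k 0)) inner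

-- ---------- pvMk basics ----------

theorem pvMk_nil {ν : Type} (f : String → ν) : pvMk [] f = PySem.Dict.empty := rfl

theorem pvMk_getD {ν : Type} (ks : List String) (f : String → ν) (k : String) (dflt : ν) :
    (pvMk ks f).getD k dflt = if k ∈ ks then f k else dflt := by
  induction ks with
  | nil => simp [pvMk, PySem.Dict.getD_eq_get?_getD, PySem.Dict.get?]
  | cons a t ih =>
    by_cases h : a = k
    · subst h
      simp [pvMk, PySem.Dict.getD_eq_get?_getD, PySem.Dict.get?_mk_cons]
    · simp only [pvMk, List.map_cons] at *
      rw [PySem.Dict.getD_eq_get?_getD, PySem.Dict.get?_mk_cons] at *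
      simp only [beq_iff_eq, h, if_false]
      rw [← PySem.Dict.getD_eq_get?_getD] at *
      rw [ih]
      simp [Ne.symm h, List.mem_cons]

theorem pvMk_contains {ν : Type} (ks : List String) (f : String → ν) (k : String) :
    (pvMk ks f).contains k = true ↔ k ∈ ks := by
  simp [pvMk, PySem.Dict.contains_mk, List.any_map]

theorem pvMk_insert_mem {ν : Type} (ks : List String) (f : String → ν) (k : String) (v : ν)
    (h : k ∈ ks) :
    (pvMk ks f).insert k v = pvMk ks (fun x => if x = k then v else f x) := by
  apply PySem.Dict.ext
  rw [PySem.Dict.items_insert_of_contains _ _ ((pvMk_contains ks f k).mpr h)]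
  show (ks.map (fun x => (x, f x))).map _ = ks.map _
  rw [List.map_map]
  apply List.map_congr_left
  intro x hx
  by_cases hxk : x = k <;> simp [hxk]

theorem pvMk_insert_not_mem {ν : Type} (ks : List String) (f : String → ν) (k : String) (v : ν)
    (h : k ∉ ks) :
    (pvMk ks f).insert k v = pvMk (ks ++ [k]) (fun x => if x = k then v else f x) := by
  apply PySem.Dict.ext
  rw [PySem.Dict.items_insert_of_not_contains]
  · show (ks.map (fun x => (x, f x))) ++ [(k, v)] = (ks ++ [k]).map _
    rw [List.map_append]
    congr 1
    · apply List.map_congr_left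
      intro x hx
      have : x ≠ k := fun e => h (e ▸ hx)
      simp [this]
    · simp
  · rw [Bool.eq_false_iff]
    intro hc
    exact h ((pvMk_contains ks f k).mp hc)

theorem pvMk_insert_self_mem {ks : List String} (f : String → Int) {k : String} (h : k ∈ ks) :
    (pvMk ks f).insert k ((pvMk ks f).getD k 0) = pvMk ks f := by
  rw [pvMk_getD, if_pos h, pvMk_insert_mem _ _ _ _ h]
  congr 1
  funext x
  by_cases hx : x = k <;> simp [hx]

theorem pvMk_inc {ks : List String} (f : String → Int) {k : String} (h : k ∈ ks) :
    (pvMk ks f).insert k ((pvMk ks f).getD k 0 + 1)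
      = pvMk ks (fun x => if x = k then f x + 1 else f x) := by
  rw [pvMk_getD, if_pos h, pvMk_insert_mem _ _ _ _ h]
  congr 1
  funext x
  by_cases hx : x = k <;> simp [hx]

-- ---------- inner-dict lemmas ----------

theorem pvInner_fold_id (xs ks : List String) (f : String → Int)
    (h : ∀ x ∈ xs, x ∈ ks) :
    xs.foldl (fun inn k => inn.insert k (inn.getD k 0)) (pvMk ks f) = pvMk ks f := by
  induction xs with
  | nil => rfl
  | cons a t ih =>
    simp only [List.foldl_cons]
    rw [pvMk_insert_self_mem f (h a (by simp))]
    exact ih (fun x hx => h x (by simp [hx]))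

theorem pvInner_fold_grow (xs ks : List String) :
    xs.foldl (fun inn k => inn.insert k (inn.getD k 0)) (pvMk ks (fun _ => (0 : Int)))
      = pvMk (PySem.Set.update ks xs) (fun _ => 0) := by
  induction xs generalizing ks with
  | nil => simp [PySem.Set.update_nil]
  | cons a t ih =>
    simp only [List.foldl_cons]
    by_cases h : a ∈ ks
    · rw [pvMk_insert_self_mem _ h,
        show PySem.Set.update ks (a :: t) = PySem.Set.update (PySem.Set.add ks a) t from rfl,
        PySem.Set.add_of_mem h]
      exact ih ks
    · rw [pvMk_getD, if_neg h, pvMk_insert_not_mem _ _ _ _ h,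
        show PySem.Set.update ks (a :: t) = PySem.Set.update (PySem.Set.add ks a) t from rfl,
        PySem.Set.add_of_not_mem h,
        show (pvMk (ks ++ [a]) fun x => if x = a then (0 : Int) else 0)
            = pvMk (ks ++ [a]) (fun _ => 0) by congr 1; funext x; simp]
      exact ih (ks ++ [a])

theorem pvInnerInit_nf (res : List String) (cl el pl : String) (f : String → Int) :
    pvInnerInit res cl el pl (pvMk (pvTpl res cl el pl) f) = pvMk (pvTpl res cl el pl) f := by
  exact pvInner_fold_id _ _ _ (fun x hx => (PySem.Set.mem_ofList _ x).mpr hx)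

theorem pvInnerInit_empty (res : List String) (cl el pl : String) :
    pvInnerInit res cl el pl PySem.Dict.empty = pvMk (pvTpl res cl el pl) (fun _ => 0) := by
  rw [← pvMk_nil (fun _ => (0 : Int))]
  exact pvInner_fold_grow _ []

theorem pvRowOp_nf (res : List String) (cl : String) (cr : List String) (el : String)
    (er : List String) (ks : List String) (f : String → Int) (r : String)
    (hr : res.contains r = true → r ∈ ks) (hc : cl ∈ ks) (he : el ∈ ks) :
    pvRowOp res cl cr el er (pvMk ks f) r
      = pvMk ks (fun k => f k + pvContrib res cl cr el er r k) := by
  unfold pvRowOp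
  cases h1 : res.contains r <;> cases h2 : cr.contains r <;> cases h3 : er.contains r <;>
  simp only [h1, h2, h3, Bool.false_eq_true, if_true, if_false, ite_true, ite_false] <;>
  (try rw [pvMk_inc _ (hr h1)]) <;>
  (try rw [pvMk_inc _ hc]) <;>
  (try rw [pvMk_inc _ he]) <;>
  · congr 1
    funext k
    simp only [pvContrib, h1, h2, h3, Bool.false_eq_true, eq_self_iff_true, and_true, and_false,
      if_false]
    (try split_ifs) <;> omega

theorem pvRowsFold (res : List String) (cl : String) (cr : List String) (el : String)
    (er : List String) (ks : List String) (rs : List String) (f : String → Int)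
    (hr : ∀ r, res.contains r = true → r ∈ ks) (hc : cl ∈ ks) (he : el ∈ ks) :
    rs.foldl (pvRowOp res cl cr el er) (pvMk ks f)
      = pvMk ks (fun k => f k + (rs.map (fun r => pvContrib res cl cr el er r k)).sum) := by
  induction rs generalizing f with
  | nil => simp
  | cons a t ih =>
    simp only [List.foldl_cons]
    rw [pvRowOp_nf res cl cr el er ks f a (hr a) hc he, ih]
    congr 1
    funext k
    simp [add_assoc]

-- ---------- A-side outer lemmas ----------

theorem pvAInit_eq (res : List String) (date : String)
    (rc : PySem.Dict String (PySem.Dict String Int)) (cl el pl : String) :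
    pvAInit res date rc cl el pl
      = rc.insert date (pvInnerInit res cl el pl (rc.getD date PySem.Dict.empty)) := by
  induction res generalizing rc with
  | nil =>
    simp [pvAInit, pvInnerInit, PySem.Dict.getD_insert_self, PySem.Dict.insert_insert_self]
  | cons a t ih =>
    simp only [pvAInit, List.foldl_cons] at *
    rw [ih]
    simp [pvInnerInit, PySem.Dict.getD_insert_self, PySem.Dict.insert_insert_self]

theorem pvTpl_mem_cl (res : List String) (cl el pl : String) : cl ∈ pvTpl res cl el pl := by
  rw [pvTpl, PySem.Set.mem_ofList]; simp

theorem pvTpl_mem_el (res : List String) (cl el pl : String) : el ∈ pvTpl res cl el pl := by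
  rw [pvTpl, PySem.Set.mem_ofList]; simp

theorem pvTpl_mem_pl (res : List String) (cl el pl : String) : pl ∈ pvTpl res cl el pl := by
  rw [pvTpl, PySem.Set.mem_ofList]; simp

theorem pvTpl_mem_res (res : List String) (cl el pl : String) {r : String}
    (h : res.contains r = true) : r ∈ pvTpl res cl el pl := by
  rw [pvTpl, PySem.Set.mem_ofList]
  simp only [List.mem_append]
  exact Or.inl (by simpa using h)

theorem pvInit_touch (res : List String) (cl el pl : String) (ds : List String)
    (v : String → String → Int) (d0 : String)
    (hz : ∀ d, d ∉ ds → ∀ k, v d k = 0) :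
    pvAInit res d0 (pvMk ds (fun d => pvMk (pvTpl res cl el pl) (v d))) cl el pl
      = pvMk (PySem.Set.add ds d0) (fun d => pvMk (pvTpl res cl el pl) (v d)) := by
  rw [pvAInit_eq, pvMk_getD]
  by_cases h : d0 ∈ ds
  · rw [if_pos h, pvInnerInit_nf, pvMk_insert_mem _ _ _ _ h, PySem.Set.add_of_mem h]
    congr 1
    funext d
    by_cases hd : d = d0 <;> simp [hd]
  · rw [if_neg h, pvInnerInit_empty, pvMk_insert_not_mem _ _ _ _ h, PySem.Set.add_of_not_mem h]
    congr 1
    funext d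
    by_cases hd : d = d0
    · subst hd
      rw [if_pos rfl]
      congr 1
      funext x
      exact (hz d h x).symm
    · simp [hd]

theorem pvAInc_nf (res : List String) (cl el pl : String) (ds : List String)
    (v : String → String → Int) (d0 k : String) (h0 : d0 ∈ ds)
    (hk : k ∈ pvTpl res cl el pl) :
    pvAInc (pvMk ds (fun d => pvMk (pvTpl res cl el pl) (v d))) d0 k
      = pvMk ds (fun d => pvMk (pvTpl res cl el pl)
          (fun x => if d = d0 ∧ x = k then v d x + 1 else v d x)) := by
  rw [show ∀ (rc : PySem.Dict String (PySem.Dict String Int)) (d k : String),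
        pvAInc rc d k = rc.insert d ((rc.getD d PySem.Dict.empty).insert k
          ((rc.getD d PySem.Dict.empty).getD k 0 + 1)) from fun _ _ _ => rfl]
  rw [pvMk_getD, if_pos h0, pvMk_inc _ hk, pvMk_insert_mem _ _ _ _ h0]
  congr 1
  funext d
  by_cases hd : d = d0
  · subst hd
    rw [if_pos rfl]
    congr 1
    funext x
    by_cases hx : x = k <;> simp [hx]
  · simp only [if_neg hd]
    congr 1
    funext x
    simp [hd]

theorem pvTouchPlan (res : List String) (cl el pl : String) (ds : List String)
    (v : String → String → Int) (d0 : String)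
    (hz : ∀ d, d ∉ ds → ∀ k, v d k = 0) :
    pvAInc (pvAInit res d0 (pvMk ds (fun d => pvMk (pvTpl res cl el pl) (v d))) cl el pl) d0 pl
      = pvMk (PySem.Set.add ds d0)
          (fun d => pvMk (pvTpl res cl el pl) (fun k => v d k + if d = d0 ∧ k = pl then 1 else 0)) := by
  rw [pvInit_touch res cl el pl ds v d0 hz,
    pvAInc_nf res cl el pl _ v d0 pl (by rw [PySem.Set.mem_add]; right; rfl)
      (pvTpl_mem_pl res cl el pl)]
  congr 1
  funext d
  congr 1
  funext k
  split_ifs <;> omega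

theorem pvTouchRow (res : List String) (cl : String) (cr : List String) (el : String)
    (er : List String) (pl : String) (ds : List String) (v : String → String → Int)
    (d0 r : String)
    (hz : ∀ d, d ∉ ds → ∀ k, v d k = 0) :
    (let rc2 := pvAInit res d0 (pvMk ds (fun d => pvMk (pvTpl res cl el pl) (v d))) cl el pl
     let rc3 := if res.contains r then pvAInc rc2 d0 r else rc2
     let rc4 := if cr.contains r then pvAInc rc3 d0 cl else rc3
     if er.contains r then pvAInc rc4 d0 el else rc4)
      = pvMk (PySem.Set.add ds d0)
          (fun d => pvMk (pvTpl res cl el pl)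
            (fun k => v d k + if d = d0 then pvContrib res cl cr el er r k else 0)) := by
  have hmem : d0 ∈ PySem.Set.add ds d0 := by rw [PySem.Set.mem_add]; right; rfl
  simp only [pvInit_touch res cl el pl ds v d0 hz]
  cases h1 : res.contains r <;> cases h2 : cr.contains r <;> cases h3 : er.contains r <;>
  simp only [h1, h2, h3, Bool.false_eq_true, if_true, if_false, ite_true, ite_false] <;>
  (try rw [pvAInc_nf res cl el pl _ _ d0 r hmem (pvTpl_mem_res res cl el pl h1)]) <;>
  (try rw [pvAInc_nf res cl el pl _ _ d0 cl hmem (pvTpl_mem_cl res cl el pl)]) <;>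
  (try rw [pvAInc_nf res cl el pl _ _ d0 el hmem (pvTpl_mem_el res cl el pl)]) <;>
  · congr 1
    funext d
    congr 1
    funext k
    simp only [pvContrib, h1, h2, h3, Bool.false_eq_true, eq_self_iff_true, and_true, and_false,
      if_false]
    (try split_ifs) <;> first | omega | tauto

theorem pvAStep_eq (res : List String) (cl : String) (cr : List String) (el : String)
    (er : List String) (pl : String) (pd : Option (List (List String)))
    (rc : PySem.Dict String (PySem.Dict String Int)) (ir : Int × List String) :
    pvAStep res cl cr el er pl pd rc ir
      = (let rc1 := (pvPlanAt pd ir.1).elim rc (fun d0 => pvAInc (pvAInit res d0 rc cl el pl) d0 pl)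
         let r := PySem.List.pyGetD ir.2 0 ""
         let d := pvNorm ir.2
         let rc2 := pvAInit res d rc1 cl el pl
         let rc3 := if res.contains r then pvAInc rc2 d r else rc2
         let rc4 := if cr.contains r then pvAInc rc3 d cl else rc3
         if er.contains r then pvAInc rc4 d el else rc4) := by
  rcases pd with _ | pdl
  · rfl
  · unfold pvAStep pvPlanAt
    by_cases h1 : pdl ≠ [] ∧ ir.1 < (pdl.length : Int)
    · by_cases h2 : PySem.List.pyGetD pdl ir.1 [] ≠ []
      · simp [h1, h2, pvNorm]
      · simp [h1, h2, pvNorm]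
    · have h3 : ¬(pdl ≠ [] ∧ ir.1 < (pdl.length : Int) ∧ PySem.List.pyGetD pdl ir.1 [] ≠ []) := by
        tauto
      simp [h1, h3, pvNorm]

theorem pvAStep_nf (res : List String) (cl : String) (cr : List String) (el : String)
    (er : List String) (pl : String) (pd : Option (List (List String)))
    (ds : List String) (v : String → String → Int) (ir : Int × List String)
    (hz : ∀ d, d ∉ ds → ∀ k, v d k = 0) :
    pvAStep res cl cr el er pl pd (pvMk ds (fun d => pvMk (pvTpl res cl el pl) (v d))) ir
      = pvMk (PySem.Set.update ds ((pvPlanAt pd ir.1).toList ++ [pvNorm ir.2]))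
          (fun d => pvMk (pvTpl res cl el pl)
            (fun k => v d k + pvStepVal res cl cr el er pl pd ir d k)) := by
  rw [pvAStep_eq]
  cases hp : pvPlanAt pd ir.1 with
  | none =>
    simp only [Option.elim_none, Option.toList_none, List.nil_append]
    rw [pvTouchRow res cl cr el er pl ds v (pvNorm ir.2) (PySem.List.pyGetD ir.2 0 "") hz]
    rw [show PySem.Set.update ds [pvNorm ir.2] = PySem.Set.add ds (pvNorm ir.2) from rfl]
    congr 1
    funext d
    congr 1
    funext k
    simp only [pvStepVal, hp]
    (try split_ifs) <;> first | omega | tauto | simp_all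
  | some d0 =>
    simp only [Option.elim_some, Option.toList_some]
    rw [pvTouchPlan res cl el pl ds v d0 hz]
    have hz1 : ∀ d, d ∉ PySem.Set.add ds d0 → ∀ k,
        (fun d k => v d k + if d = d0 ∧ k = pl then 1 else 0) d k = 0 := by
      intro d hd k
      have hds : d ∉ ds := fun h => hd ((PySem.Set.mem_add ds d0 d).mpr (Or.inl h))
      have hdd0 : d ≠ d0 := fun h => hd ((PySem.Set.mem_add ds d0 d).mpr (Or.inr h))
      simp [hz d hds k, hdd0]
    rw [pvTouchRow res cl cr el er pl (PySem.Set.add ds d0) _ (pvNorm ir.2)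
      (PySem.List.pyGetD ir.2 0 "") hz1]
    rw [show PySem.Set.update ds ([d0] ++ [pvNorm ir.2])
          = PySem.Set.add (PySem.Set.add ds d0) (pvNorm ir.2) from rfl]
    congr 1
    funext d
    congr 1
    funext k
    simp only [pvStepVal, hp, Option.some_inj]
    (try split_ifs) <;> first | omega | tauto | simp_all

theorem pvALoop (res : List String) (cl : String) (cr : List String) (el : String)
    (er : List String) (pl : String) (pd : Option (List (List String)))
    (l : List (Int × List String)) (ds : List String) (v : String → String → Int)
    (hz : ∀ d, d ∉ ds → ∀ k, v d k = 0) :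
    l.foldl (pvAStep res cl cr el er pl pd) (pvMk ds (fun d => pvMk (pvTpl res cl el pl) (v d)))
      = pvMk (PySem.Set.update ds (pvDates pd l))
          (fun d => pvMk (pvTpl res cl el pl)
            (fun k => v d k + pvVal res cl cr el er pl pd l d k)) := by
  induction l generalizing ds v with
  | nil =>
    simp only [List.foldl_nil, pvDates, List.flatMap_nil, PySem.Set.update_nil, pvVal,
      List.map_nil, List.sum_nil, add_zero]
  | cons ir t ih =>
    simp only [List.foldl_cons]
    rw [pvAStep_nf res cl cr el er pl pd ds v ir hz]
    have hz' : ∀ d, d ∉ PySem.Set.update ds ((pvPlanAt pd ir.1).toList ++ [pvNorm ir.2]) → ∀ k,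
        (fun d k => v d k + pvStepVal res cl cr el er pl pd ir d k) d k = 0 := by
      intro d hd k
      have hmem := PySem.Set.mem_update ds ((pvPlanAt pd ir.1).toList ++ [pvNorm ir.2]) d
      have hds : d ∉ ds := fun h => hd (hmem.mpr (Or.inl h))
      have hnorm : pvNorm ir.2 ≠ d := fun h => hd (hmem.mpr (Or.inr (by simp [h])))
      have hplan : pvPlanAt pd ir.1 ≠ some d := fun h => hd (hmem.mpr (Or.inr (by simp [h])))
      simp [pvStepVal, hz d hds k, hnorm, hplan]
    rw [ih _ _ hz']
    rw [show pvDates pd (ir :: t)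
          = ((pvPlanAt pd ir.1).toList ++ [pvNorm ir.2]) ++ pvDates pd t from by simp [pvDates]]
    rw [show PySem.Set.update ds (((pvPlanAt pd ir.1).toList ++ [pvNorm ir.2]) ++ pvDates pd t)
          = PySem.Set.update (PySem.Set.update ds ((pvPlanAt pd ir.1).toList ++ [pvNorm ir.2]))
              (pvDates pd t) from by simp [PySem.Set.update, List.foldl_append]]
    congr 1
    funext d
    congr 1
    funext k
    simp only [pvVal, List.map_cons, List.sum_cons]
    omega

-- ---------- B-side loop lemmas ----------

theorem pvBStep_fst (pd : Option (List (List String)))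
    (st : PySem.Dict String (List String) × PySem.Dict String Int × List String)
    (ir : Int × List String) :
    (pvBStep pd st ir).1
      = st.1.modify (pvNorm ir.2) [] (fun l => l ++ [PySem.List.pyGetD ir.2 0 ""]) := by
  unfold pvBStep pvNorm
  rcases pd with _ | pdl
  · rfl
  · by_cases h : pdl ≠ [] ∧ ir.1 < (pdl.length : Int) ∧ PySem.List.pyGetD pdl ir.1 [] ≠ [] <;>
      simp [h]

theorem pvBStep_snd (pd : Option (List (List String)))
    (st : PySem.Dict String (List String) × PySem.Dict String Int × List String)
    (ir : Int × List String) :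
    (pvBStep pd st ir).2.1
      = (pvPlanAt pd ir.1).elim st.2.1 (fun d0 => st.2.1.insert d0 (st.2.1.getD d0 0 + 1)) := by
  unfold pvBStep pvPlanAt
  rcases pd with _ | pdl
  · rfl
  · by_cases h : pdl ≠ [] ∧ ir.1 < (pdl.length : Int) ∧ PySem.List.pyGetD pdl ir.1 [] ≠ [] <;>
      simp [h]

theorem pvBStep_thd (pd : Option (List (List String)))
    (st : PySem.Dict String (List String) × PySem.Dict String Int × List String)
    (ir : Int × List String) :
    (pvBStep pd st ir).2.2
      = PySem.Set.update st.2.2 ((pvPlanAt pd ir.1).toList ++ [pvNorm ir.2]) := by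
  unfold pvBStep pvPlanAt pvNorm
  rcases pd with _ | pdl
  · simp [PySem.Set.update, PySem.Set.add, PySem.Set.contains]
  · by_cases h : pdl ≠ [] ∧ ir.1 < (pdl.length : Int) ∧ PySem.List.pyGetD pdl ir.1 [] ≠ [] <;>
      simp [h, PySem.Set.update, PySem.Set.add, PySem.Set.contains]

theorem pvBLoop_rows (pd : Option (List (List String))) (l : List (Int × List String))
    (st : PySem.Dict String (List String) × PySem.Dict String Int × List String) (d : String) :
    ((l.foldl (pvBStep pd) st).1).getD d [] = st.1.getD d [] ++ pvRows l d := by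
  induction l generalizing st with
  | nil => simp [pvRows]
  | cons ir t ih =>
    simp only [List.foldl_cons]
    rw [ih, pvBStep_fst, PySem.Dict.getD_modify]
    simp only [pvRows, List.filter_cons]
    by_cases hd : pvNorm ir.2 = d
    · simp [hd, List.map_cons]
    · have hd' : ¬d = pvNorm ir.2 := fun h => hd h.symm
      simp [hd, hd']

theorem pvBLoop_plan (pd : Option (List (List String))) (l : List (Int × List String))
    (st : PySem.Dict String (List String) × PySem.Dict String Int × List String) (d : String) :
    ((l.foldl (pvBStep pd) st).2.1).getD d 0 = st.2.1.getD d 0 + pvPlanCnt pd l d := by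
  induction l generalizing st with
  | nil => simp [pvPlanCnt]
  | cons ir t ih =>
    simp only [List.foldl_cons]
    rw [ih, pvBStep_snd]
    simp only [pvPlanCnt, List.countP_cons]
    cases hp : pvPlanAt pd ir.1 with
    | none =>
      simp only [Option.elim_none, hp]
      have h0 : ((none : Option String) == some d) = false := rfl
      simp [h0]
    | some d0 =>
      simp only [Option.elim_some]
      by_cases hd : d0 = d
      · subst hd
        rw [PySem.Dict.getD_insert_self]
        simp [hp]
        push_cast
        ring
      · rw [PySem.Dict.getD_insert_of_ne]
        · have h0 : (some d0 == some d) = false := by simp [hd]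
          simp [h0]
        · exact fun h => hd h.symm

theorem pvBLoop_dates (pd : Option (List (List String))) (l : List (Int × List String))
    (st : PySem.Dict String (List String) × PySem.Dict String Int × List String) :
    (l.foldl (pvBStep pd) st).2.2 = PySem.Set.update st.2.2 (pvDates pd l) := by
  induction l generalizing st with
  | nil => simp [pvDates, PySem.Set.update_nil]
  | cons ir t ih =>
    simp only [List.foldl_cons]
    rw [ih, pvBStep_thd]
    rw [show pvDates pd (ir :: t)
          = ((pvPlanAt pd ir.1).toList ++ [pvNorm ir.2]) ++ pvDates pd t from by simp [pvDates]]
    simp [PySem.Set.update, List.foldl_append]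

-- ---------- value bookkeeping ----------

theorem pvVal_split (res : List String) (cl : String) (cr : List String) (el : String)
    (er : List String) (pl : String) (pd : Option (List (List String)))
    (l : List (Int × List String)) (d k : String) :
    pvVal res cl cr el er pl pd l d k
      = (if k = pl then pvPlanCnt pd l d else 0)
        + ((pvRows l d).map (fun r => pvContrib res cl cr el er r k)).sum := by
  induction l with
  | nil => simp [pvVal, pvPlanCnt, pvRows]
  | cons ir t ih =>
    simp only [pvVal, List.map_cons, List.sum_cons] at *
    rw [ih]
    simp only [pvStepVal, pvPlanCnt, pvRows, List.countP_cons, List.filter_cons]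
    by_cases hp : pvPlanAt pd ir.1 = some d <;> by_cases hn : pvNorm ir.2 = d <;>
      by_cases hk : k = pl <;>
      simp [hp, hn, hk] <;> push_cast <;> ring

theorem pvTplFold (res : List String) (cl el pl : String) :
    (pvTpl res cl el pl).foldl (fun cd k => cd.insert k (0 : Int)) PySem.Dict.empty
      = pvMk (pvTpl res cl el pl) (fun _ => 0) := by
  apply PySem.Dict.ext
  rw [PySem.Dict.items_foldl_insert_fresh (pvTpl res cl el pl) (fun a => a) (fun _ => 0)
    PySem.Dict.empty (fun a _ => PySem.Dict.contains_empty a) (by simp [pvTpl])]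
  rfl

theorem pvBTally_eq (res : List String) (cl : String) (cr : List String) (el : String)
    (er : List String) (pl : String) (pc : PySem.Dict String Int)
    (rb : PySem.Dict String (List String)) (pd : Option (List (List String)))
    (l : List (Int × List String)) (d : String)
    (hpc : pc.getD d 0 = pvPlanCnt pd l d) (hrb : rb.getD d [] = pvRows l d) :
    pvBTally res cl cr el er pl (PySem.List.dedup (res ++ [cl, el, pl])) pc rb d
      = pvMk (pvTpl res cl el pl) (pvVal res cl cr el er pl pd l d) := by
  rw [show pvBTally res cl cr el er pl (PySem.List.dedup (res ++ [cl, el, pl])) pc rb d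
        = (rb.getD d []).foldl (pvRowOp res cl cr el er)
            (((PySem.List.dedup (res ++ [cl, el, pl])).foldl
                (fun cd k => cd.insert k (0 : Int)) PySem.Dict.empty).insert pl
              (((PySem.List.dedup (res ++ [cl, el, pl])).foldl
                  (fun cd k => cd.insert k (0 : Int)) PySem.Dict.empty).getD pl 0 + pc.getD d 0))
      from rfl]
  rw [show PySem.List.dedup (res ++ [cl, el, pl]) = pvTpl res cl el pl from
    PySem.List.dedup_eq_ofList _]
  rw [pvTplFold res cl el pl]
  rw [pvMk_getD, if_pos (pvTpl_mem_pl res cl el pl),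
    pvMk_insert_mem _ _ _ _ (pvTpl_mem_pl res cl el pl)]
  rw [hrb, hpc]
  rw [pvRowsFold res cl cr el er _ _ _ (fun r hr => pvTpl_mem_res res cl el pl hr)
    (pvTpl_mem_cl res cl el pl) (pvTpl_mem_el res cl el pl)]
  congr 1
  funext k
  rw [pvVal_split]
  split_ifs <;> omega

-- ---------- sorting ----------

theorem pvSorted_map_fst {ν : Type} (D : List String) (F : String → ν) (h : D.Nodup) :
    PySem.List.sorted (D.map (fun d => (d, F d))) (fun kv => kv.1) false
      = (PySem.List.sorted D (fun x => x) false).map (fun d => (d, F d)) := by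
  apply PySem.List.sorted_eq_of_perm_of_pairwise_lt
  · exact (PySem.List.sorted_perm D (fun x => x) false).map _
  · rw [List.pairwise_map]
    have hle := PySem.List.sorted_pairwise D (fun x => x)
    have hnd : (PySem.List.sorted D (fun x => x) false).Nodup :=
      (PySem.List.sorted_perm D (fun x => x) false).symm.nodup h
    exact (hle.and hnd).imp (fun hab => lt_of_le_of_ne hab.1 hab.2)

-- ---------- main equality ----------

theorem pvMainEq (data : List (List String)) (res : List String) (cl : String)
    (cr : List String) (el : String) (er : List String) (pl : String)
    (pd : Option (List (List String))) :
    aggregate_daily_results data res cl cr el er pl pd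
      = aggregate_daily_results_alt data res cl cr el er pl pd := by
  have hA : (PySem.List.enumerate data).foldl (pvAStep res cl cr el er pl pd) PySem.Dict.empty
      = pvMk (PySem.Set.ofList (pvDates pd (PySem.List.enumerate data)))
          (fun d => pvMk (pvTpl res cl el pl)
            (pvVal res cl cr el er pl pd (PySem.List.enumerate data) d)) := by
    rw [show (PySem.Dict.empty : PySem.Dict String (PySem.Dict String Int))
          = pvMk [] (fun d => pvMk (pvTpl res cl el pl) ((fun _ _ => (0 : Int)) d)) from rfl]
    rw [pvALoop res cl cr el er pl pd (PySem.List.enumerate data) [] (fun _ _ => 0)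
      (fun _ _ _ => rfl)]
    congr 1
    funext d
    congr 1
    funext k
    simp
  have hB1 : ∀ d, (((PySem.List.enumerate data).foldl (pvBStep pd)
        (PySem.Dict.empty, PySem.Dict.empty, [])).1).getD d []
      = pvRows (PySem.List.enumerate data) d := by
    intro d
    rw [pvBLoop_rows]
    simp
  have hB2 : ∀ d, (((PySem.List.enumerate data).foldl (pvBStep pd)
        (PySem.Dict.empty, PySem.Dict.empty, [])).2.1).getD d 0
      = pvPlanCnt pd (PySem.List.enumerate data) d := by
    intro d
    rw [pvBLoop_plan]
    simp
  have hB3 : ((PySem.List.enumerate data).foldl (pvBStep pd)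
        (PySem.Dict.empty, PySem.Dict.empty, [])).2.2
      = PySem.Set.ofList (pvDates pd (PySem.List.enumerate data)) := by
    rw [pvBLoop_dates]
    rfl
  rw [show aggregate_daily_results data res cl cr el er pl pd
        = (((PySem.List.sorted (((PySem.List.enumerate data).foldl
                (pvAStep res cl cr el er pl pd) PySem.Dict.empty).items)
              (fun kv => kv.1) false).foldl
            (fun (acc : PySem.Dict String (PySem.Dict String Int) ×
                PySem.Dict String (PySem.Dict String Int)) kv =>
              if kv.1 = "no_date" then (acc.1, PySem.Dict.empty.insert "no_date" kv.2)
              else (acc.1.insert kv.1 kv.2, acc.2))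
            (PySem.Dict.empty, PySem.Dict.empty)).1.items.map (fun q => (q.1, q.2.items)),
           ((PySem.List.sorted (((PySem.List.enumerate data).foldl
                (pvAStep res cl cr el er pl pd) PySem.Dict.empty).items)
              (fun kv => kv.1) false).foldl
            (fun (acc : PySem.Dict String (PySem.Dict String Int) ×
                PySem.Dict String (PySem.Dict String Int)) kv =>
              if kv.1 = "no_date" then (acc.1, PySem.Dict.empty.insert "no_date" kv.2)
              else (acc.1.insert kv.1 kv.2, acc.2))
            (PySem.Dict.empty, PySem.Dict.empty)).2.items.map (fun q => (q.1, q.2.items)))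
      from rfl]
  rw [show aggregate_daily_results_alt data res cl cr el er pl pd
        = (((PySem.List.sorted (((PySem.List.enumerate data).foldl (pvBStep pd)
                (PySem.Dict.empty, PySem.Dict.empty, [])).2.2) (fun x => x) false).foldl
            (fun (acc : PySem.Dict String (PySem.Dict String Int) ×
                PySem.Dict String (PySem.Dict String Int)) d =>
              if d = "no_date" then
                (acc.1, PySem.Dict.empty.insert "no_date"
                  (pvBTally res cl cr el er pl
                    (PySem.List.dedup (res ++ [cl, el, pl]))
                    (((PySem.List.enumerate data).foldl (pvBStep pd)
                      (PySem.Dict.empty, PySem.Dict.empty, [])).2.1)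
                    (((PySem.List.enumerate data).foldl (pvBStep pd)
                      (PySem.Dict.empty, PySem.Dict.empty, [])).1) d))
              else
                (acc.1.insert d
                  (pvBTally res cl cr el er pl
                    (PySem.List.dedup (res ++ [cl, el, pl]))
                    (((PySem.List.enumerate data).foldl (pvBStep pd)
                      (PySem.Dict.empty, PySem.Dict.empty, [])).2.1)
                    (((PySem.List.enumerate data).foldl (pvBStep pd)
                      (PySem.Dict.empty, PySem.Dict.empty, [])).1) d), acc.2))
            (PySem.Dict.empty, PySem.Dict.empty)).1.items.map (fun q => (q.1, q.2.items)),
           ((PySem.List.sorted (((PySem.List.enumerate data).foldl (pvBStep pd)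
                (PySem.Dict.empty, PySem.Dict.empty, [])).2.2) (fun x => x) false).foldl
            (fun (acc : PySem.Dict String (PySem.Dict String Int) ×
                PySem.Dict String (PySem.Dict String Int)) d =>
              if d = "no_date" then
                (acc.1, PySem.Dict.empty.insert "no_date"
                  (pvBTally res cl cr el er pl
                    (PySem.List.dedup (res ++ [cl, el, pl]))
                    (((PySem.List.enumerate data).foldl (pvBStep pd)
                      (PySem.Dict.empty, PySem.Dict.empty, [])).2.1)
                    (((PySem.List.enumerate data).foldl (pvBStep pd)
                      (PySem.Dict.empty, PySem.Dict.empty, [])).1) d))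
              else
                (acc.1.insert d
                  (pvBTally res cl cr el er pl
                    (PySem.List.dedup (res ++ [cl, el, pl]))
                    (((PySem.List.enumerate data).foldl (pvBStep pd)
                      (PySem.Dict.empty, PySem.Dict.empty, [])).2.1)
                    (((PySem.List.enumerate data).foldl (pvBStep pd)
                      (PySem.Dict.empty, PySem.Dict.empty, [])).1) d), acc.2))
            (PySem.Dict.empty, PySem.Dict.empty)).2.items.map (fun q => (q.1, q.2.items)))
      from rfl]
  rw [hA, hB3]
  rw [show (pvMk (PySem.Set.ofList (pvDates pd (PySem.List.enumerate data)))
        (fun d => pvMk (pvTpl res cl el pl)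
          (pvVal res cl cr el er pl pd (PySem.List.enumerate data) d))).items
      = (PySem.Set.ofList (pvDates pd (PySem.List.enumerate data))).map
          (fun d => (d, pvMk (pvTpl res cl el pl)
            (pvVal res cl cr el er pl pd (PySem.List.enumerate data) d))) from rfl]
  rw [pvSorted_map_fst (PySem.Set.ofList (pvDates pd (PySem.List.enumerate data)))
    (fun d => pvMk (pvTpl res cl el pl)
      (pvVal res cl cr el er pl pd (PySem.List.enumerate data) d))
    (PySem.Set.nodup_ofList _)]
  rw [List.foldl_map]
  have hstep : (fun (acc : PySem.Dict String (PySem.Dict String Int) ×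
          PySem.Dict String (PySem.Dict String Int)) d =>
        if d = "no_date" then
          (acc.1, PySem.Dict.empty.insert "no_date"
            (pvBTally res cl cr el er pl
              (PySem.List.dedup (res ++ [cl, el, pl]))
              (((PySem.List.enumerate data).foldl (pvBStep pd)
                (PySem.Dict.empty, PySem.Dict.empty, [])).2.1)
              (((PySem.List.enumerate data).foldl (pvBStep pd)
                (PySem.Dict.empty, PySem.Dict.empty, [])).1) d))
        else
          (acc.1.insert d
            (pvBTally res cl cr el er pl
              (PySem.List.dedup (res ++ [cl, el, pl]))
              (((PySem.List.enumerate data).foldl (pvBStep pd)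
                (PySem.Dict.empty, PySem.Dict.empty, [])).2.1)
              (((PySem.List.enumerate data).foldl (pvBStep pd)
                (PySem.Dict.empty, PySem.Dict.empty, [])).1) d), acc.2))
      = (fun (acc : PySem.Dict String (PySem.Dict String Int) ×
          PySem.Dict String (PySem.Dict String Int)) d =>
        if d = "no_date" then
          (acc.1, PySem.Dict.empty.insert "no_date"
            (pvMk (pvTpl res cl el pl)
              (pvVal res cl cr el er pl pd (PySem.List.enumerate data) d)))
        else
          (acc.1.insert d
            (pvMk (pvTpl res cl el pl)
              (pvVal res cl cr el er pl pd (PySem.List.enumerate data) d)), acc.2)) := by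
    funext acc d
    rw [pvBTally_eq res cl cr el er pl _ _ pd (PySem.List.enumerate data) d (hB2 d) (hB1 d)]
  rw [hstep]

-- ===== VERDICT (by name: the statement is the Claim_ definition above) =====
theorem aggregate_daily_results_spec : Claim_equal_aggregate_daily_results := by
  intro data res cl cr el er pl pd _ _
  unfold Spec_aggregate_daily_results
  exact pvMainEq data res cl cr el er pl pd
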